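-- pv_equiv track=rewrite | github.com/bitranox/skills | md-table-formatting/reformat_tables.py | parse_separator_cell
-- ===== SOURCE A (Python) =====
-- def parse_separator_cell(cell):
--     """Parse a separator cell, return (left_align, right_align, is_valid).
--
--     Recognizes: ---, :---, ---:, :---:
--     """
--     s = cell.strip()
--     if not s:
--         return False, False, False
--     left = s.startswith(':')
--     right = s.endswith(':')
--     inner = s.lstrip(':').rstrip(':')
--     if not inner or not all(c == '-' for c in inner):
--         return False, False, False
--     return left, right, True
-- ===== SOURCE B (Python) =====
-- def _valid(s, i, state):
--     """Three-state machine over s[i:]: state 0 = leading colons, 1 = dashes, 2 = trailing colons."""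
--     if i == len(s):
--         return state >= 1
--     c = s[i]
--     if c == ':':
--         return _valid(s, i + 1, 2 if state >= 1 else 0)
--     if c == '-':
--         return state <= 1 and _valid(s, i + 1, 1)
--     return False
--
--
-- def parse_separator_cell(cell):
--     """Parse a separator cell, return (left_align, right_align, is_valid).
--
--     Recognizes: ---, :---, ---:, :---:
--     """
--     s = cell.strip()
--     if _valid(s, 0, 0):
--         return s.startswith(':'), s.endswith(':'), True
--     return False, False, False
-- ===== Notes on version B (the rewrite author's own statement) =====
-- stated objective: alternative
-- what changed: Replaces A's staged strip-the-colons-then-check-all-dashes passes with a single recursive three-state machine (leading colons / dashes / trailing colons) that consumes the stripped cell character by character.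
import Mathlib
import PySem

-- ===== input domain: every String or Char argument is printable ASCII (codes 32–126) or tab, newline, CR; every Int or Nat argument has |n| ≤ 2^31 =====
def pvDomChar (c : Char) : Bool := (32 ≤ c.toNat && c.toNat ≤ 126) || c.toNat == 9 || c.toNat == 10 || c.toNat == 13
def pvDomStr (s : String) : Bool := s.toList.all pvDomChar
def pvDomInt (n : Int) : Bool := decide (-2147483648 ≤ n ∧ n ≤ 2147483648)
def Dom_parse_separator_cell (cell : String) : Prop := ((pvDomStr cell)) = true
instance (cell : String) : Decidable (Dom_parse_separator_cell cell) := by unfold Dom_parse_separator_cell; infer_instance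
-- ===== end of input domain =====

-- B validates the stripped cell with one recursive three-state machine instead of A's colon-strip passes plus an all-dashes scan (alternative; same cost).

-- ===== PORT A =====
-- exact: s.lstrip(':')
def pyLstripColon (l : List Char) : List Char := l.dropWhile (· == ':')
-- exact: s.rstrip(':')
def pyRstripColon (l : List Char) : List Char := (l.reverse.dropWhile (· == ':')).reverse

def parse_separator_cell (cell : String) : Bool × Bool × Bool :=
  let s := PySem.Chars.strip cell.toList
  if s.isEmpty then (false, false, false)
  else
    let left := PySem.Chars.startswith s [':']
    let right := PySem.Chars.endswith s [':']
    let inner := pyRstripColon (pyLstripColon s)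
    if inner.isEmpty || !(inner.all (· == '-')) then (false, false, false)
    else (left, right, true)

-- ===== PORT B =====
-- transliteration of Source B's _valid: state 0 = leading colons, 1 = dashes, 2 = trailing colons
-- (the index recursion over s[i:] becomes the obvious structural recursion on the list)
def pvSepValid : List Char → Nat → Bool
  | [], st => decide (1 ≤ st)
  | c :: rest, st =>
    if c == ':' then pvSepValid rest (if 1 ≤ st then 2 else 0)
    else if c == '-' then decide (st ≤ 1) && pvSepValid rest 1
    else false

def parse_separator_cell_alt (cell : String) : Bool × Bool × Bool :=
  let s := PySem.Chars.strip cell.toList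
  if pvSepValid s 0 then
    (PySem.Chars.startswith s [':'], PySem.Chars.endswith s [':'], true)
  else (false, false, false)

-- ===== PRECONDITION & SPEC =====
def Spec_parse_separator_cell (cell : String) (out : Bool × Bool × Bool) : Prop := out = parse_separator_cell_alt cell
instance (cell : String) (out : Bool × Bool × Bool) : Decidable (Spec_parse_separator_cell cell out) := by unfold Spec_parse_separator_cell; infer_instance

-- ===== CLAIM (what is proved, stated in full; the proofs are below) =====
def Claim_equal_parse_separator_cell : Prop := ∀ (cell : String), Dom_parse_separator_cell cell → Spec_parse_separator_cell cell (parse_separator_cell cell)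

-- ===== LEMMAS AND PROOFS =====

lemma dw_colon (n m : Nat) :
    (List.replicate n ':' ++ List.replicate (m+1) '-').dropWhile (· == ':') = List.replicate (m+1) '-' := by
  induction n with
  | zero => simp [List.replicate_succ]
  | succ n ih => simpa [List.replicate_succ] using ih

-- the machine accepts from state 2 exactly a (possibly empty) run of colons: soundness direction used below
lemma valid2 (c : Nat) : pvSepValid (List.replicate c ':') 2 = true := by
  induction c with
  | zero => simp [pvSepValid]
  | succ c ih => simpa [List.replicate_succ, pvSepValid] using ih

lemma valid1 (m c : Nat) : pvSepValid (List.replicate m '-' ++ List.replicate c ':') 1 = true := by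
  induction m with
  | zero =>
    cases c with
    | zero => simp [pvSepValid]
    | succ c => simpa [List.replicate_succ, pvSepValid] using valid2 c
  | succ m ih => simpa [List.replicate_succ, pvSepValid] using ih

lemma valid0 (a m c : Nat) :
    pvSepValid (List.replicate a ':' ++ List.replicate (m+1) '-' ++ List.replicate c ':') 0 = true := by
  induction a with
  | zero => simpa [List.replicate_succ, pvSepValid] using valid1 m c
  | succ a ih => simpa [List.replicate_succ, pvSepValid] using ih

-- completeness: whatever the machine accepts from each state has the corresponding shape
lemma pvSepValid_shape (l : List Char) :
    (pvSepValid l 0 = true → ∃ a m c, l = List.replicate a ':' ++ List.replicate (m+1) '-' ++ List.replicate c ':') ∧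
    (pvSepValid l 1 = true → ∃ m c, l = List.replicate m '-' ++ List.replicate c ':') ∧
    (pvSepValid l 2 = true → ∃ c, l = List.replicate c ':') := by
  induction l with
  | nil =>
    refine ⟨by simp [pvSepValid], fun _ => ⟨0, 0, by simp⟩, fun _ => ⟨0, by simp⟩⟩
  | cons x rest ih =>
    obtain ⟨ih0, ih1, ih2⟩ := ih
    by_cases hx : x = ':'
    · subst hx
      refine ⟨?_, ?_, ?_⟩
      · intro h
        simp only [pvSepValid, beq_self_eq_true, if_true] at h
        norm_num at h
        obtain ⟨a, m, c, hr⟩ := ih0 h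
        exact ⟨a + 1, m, c, by simp [List.replicate_succ, hr]⟩
      · intro h
        simp only [pvSepValid, beq_self_eq_true, if_true] at h
        norm_num at h
        obtain ⟨c, hr⟩ := ih2 h
        exact ⟨0, c + 1, by simp [List.replicate_succ, hr]⟩
      · intro h
        simp only [pvSepValid, beq_self_eq_true, if_true] at h
        norm_num at h
        obtain ⟨c, hr⟩ := ih2 h
        exact ⟨c + 1, by simp [List.replicate_succ, hr]⟩
    · by_cases hd : x = '-'
      · subst hd
        refine ⟨?_, ?_, ?_⟩
        · intro h
          simp only [pvSepValid] at h
          norm_num at h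
          obtain ⟨m, c, hr⟩ := ih1 h
          exact ⟨0, m, c, by simp [List.replicate_succ, hr]⟩
        · intro h
          simp only [pvSepValid] at h
          norm_num at h
          obtain ⟨m, c, hr⟩ := ih1 h
          exact ⟨m + 1, c, by simp [List.replicate_succ, hr]⟩
        · intro h
          simp [pvSepValid] at h
      · refine ⟨?_, ?_, ?_⟩ <;> intro h <;> simp [pvSepValid, hx, hd] at h

lemma dw_colon3 (a m n : Nat) :
    (List.replicate a ':' ++ List.replicate (m+1) '-' ++ List.replicate n ':').dropWhile (· == ':') =
      List.replicate (m+1) '-' ++ List.replicate n ':' := by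
  induction a with
  | zero => simp [List.replicate_succ]
  | succ a ih => simpa [List.replicate_succ] using ih

-- B's machine accepts from state 0 exactly A's "after dropping leading colons: some dashes then colons"
lemma pvSepValid_iff (l : List Char) :
    pvSepValid l 0 = true ↔ ∃ m n, l.dropWhile (· == ':') = List.replicate (m+1) '-' ++ List.replicate n ':' := by
  constructor
  · intro h
    obtain ⟨a, m, n, hr⟩ := (pvSepValid_shape l).1 h
    exact ⟨m, n, by rw [hr, dw_colon3]⟩
  · rintro ⟨m, n, h⟩
    have htk : l.takeWhile (· == ':') = List.replicate (l.takeWhile (· == ':')).length ':' := by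
      apply List.eq_replicate_length.mpr
      intro b hb
      exact beq_iff_eq.mp (List.mem_takeWhile_imp (p := fun x => x == ':') (l := l) hb)
    have hsplit : l = l.takeWhile (· == ':') ++ l.dropWhile (· == ':') :=
      (List.takeWhile_append_dropWhile ..).symm
    rw [hsplit, htk, h]
    simpa [List.append_assoc] using valid0 _ m n

-- A's validity test (inner nonempty and all dashes) succeeds on the same inputs
lemma pyAvalid_iff (l : List Char) :
    (!(pyRstripColon (pyLstripColon l)).isEmpty && (pyRstripColon (pyLstripColon l)).all (· == '-')) = true ↔
    ∃ m n, l.dropWhile (· == ':') = List.replicate (m+1) '-' ++ List.replicate n ':' := by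
  unfold pyRstripColon pyLstripColon
  set t := l.dropWhile (· == ':') with ht
  simp only [Bool.and_eq_true, Bool.not_eq_true', List.isEmpty_eq_false_iff]
  constructor
  · rintro ⟨hd, ha⟩
    set u := t.reverse.dropWhile (· == ':') with hu
    have hsplit : t.reverse = t.reverse.takeWhile (· == ':') ++ u := (List.takeWhile_append_dropWhile ..).symm
    have hrev : t = u.reverse ++ (t.reverse.takeWhile (· == ':')).reverse := by
      have h := congrArg List.reverse hsplit
      simpa [List.reverse_append] using h
    have h1 : u.reverse = List.replicate u.reverse.length '-' := by
      apply List.eq_replicate_length.mpr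
      intro b hb
      have hp := List.all_eq_true.mp ha b hb
      exact beq_iff_eq.mp hp
    have h2 : t.reverse.takeWhile (· == ':') = List.replicate (t.reverse.takeWhile (· == ':')).length ':' := by
      apply List.eq_replicate_length.mpr
      intro b hb
      have hp := List.mem_takeWhile_imp (p := fun x => x == ':') (l := t.reverse) hb
      exact beq_iff_eq.mp hp
    have h2' : (t.reverse.takeWhile (· == ':')).reverse = List.replicate (t.reverse.takeWhile (· == ':')).length ':' := by
      conv_lhs => rw [h2]
      simp
    obtain ⟨L1, hL1⟩ : ∃ k, u.reverse = List.replicate k '-' := ⟨_, h1⟩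
    obtain ⟨L2, hL2⟩ : ∃ k, (t.reverse.takeWhile (· == ':')).reverse = List.replicate k ':' := ⟨_, h2'⟩
    have hpos : 0 < L1 := by
      rcases Nat.eq_zero_or_pos L1 with h0 | hp
      · rw [h0] at hL1; simp at hL1; exact absurd (by simp [hL1]) hd
      · exact hp
    refine ⟨L1 - 1, L2, ?_⟩
    have he : L1 - 1 + 1 = L1 := by omega
    rw [he, hrev, hL1, hL2]
  · rintro ⟨m, n, h⟩
    have hrev : t.reverse = List.replicate n ':' ++ List.replicate (m+1) '-' := by
      rw [h]; simp [List.reverse_append]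
    rw [hrev, dw_colon]
    refine ⟨by simp, by simp⟩

lemma main_eq (cell : String) : parse_separator_cell cell = parse_separator_cell_alt cell := by
  unfold parse_separator_cell parse_separator_cell_alt
  set s := PySem.Chars.strip cell.toList with hs
  by_cases hm : pvSepValid s 0 = true
  · obtain ⟨m, n, hform⟩ := (pvSepValid_iff s).mp hm
    have hA := (pyAvalid_iff s).mpr ⟨m, n, hform⟩
    have hA1 : (pyRstripColon (pyLstripColon s)).isEmpty = false := by
      have h := (Bool.and_eq_true _ _).mp hA |>.1
      simpa using h
    have hA2 : (pyRstripColon (pyLstripColon s)).all (· == '-') = true := ((Bool.and_eq_true _ _).mp hA).2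
    have hsne : s.isEmpty = false := by
      cases hcase : s with
      | nil =>
        rw [hcase] at hform
        simp [List.replicate_succ] at hform
      | cons a t => simp
    simp [hsne, hm, hA1, hA2]
  · have hm' : pvSepValid s 0 = false := Bool.eq_false_iff.mpr hm
    by_cases hse : s.isEmpty = true
    · simp [hse, hm']
    · have hsf : s.isEmpty = false := Bool.eq_false_iff.mpr hse
      have hAv : (!(pyRstripColon (pyLstripColon s)).isEmpty && (pyRstripColon (pyLstripColon s)).all (· == '-')) = false := by
        apply Bool.eq_false_iff.mpr
        intro h
        exact hm ((pvSepValid_iff s).mpr ((pyAvalid_iff s).mp h))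
      cases hre : (pyRstripColon (pyLstripColon s)).isEmpty <;>
        cases hra : (pyRstripColon (pyLstripColon s)).all (· == '-') <;>
        simp [hsf, hm', hre, hra] <;> simp [hre, hra] at hAv

-- ===== VERDICT (by name: the statement is the Claim_ definition above) =====
theorem parse_separator_cell_spec : Claim_equal_parse_separator_cell := by
  intro cell _
  unfold Spec_parse_separator_cell
  exact main_eq cell
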